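-- pv_equiv track=rewrite | github.com/javiipzo/Clases_Carla_Poli | Dicc_2.py | solution
-- ===== SOURCE A (Python) =====
-- def solution(s):
--     list=[]
--     #primero separo el caso donde la lista sea de len par o impar
--     if len(s)%2==0:
--         #Recorro la lista entera y voy añadiendo de 2 en 2 los elementos, separando 2 posibles casos
--         for i in range (int(len(s)/2)):
--             if(i==0):
--                 add=s[i]+''+s[i+1]
--             else:
--                 i=i*2
--                 add=s[i]+''+s[i+1]
--             list.append(add)
--     else:
--         #Recorro la lista excepto el ultimo elemento, voy añadiendo a la lista final cada elemento y
--         #luego por separado añado el ultimo caracter con la _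
--         for i in range (int((len(s)-1)/2)):
--             if(i==0):
--                 add=s[i]+''+s[i+1]
--             else:
--                 i=i*2
--                 add=s[i]+''+s[i+1]
--             list.append(add)
--         add2=s[len(s)-1]+'_'
--         list.append(add2)
--
--
--     return list
-- ===== SOURCE B (Python) =====
-- def solution(s):
--     # One uniform comprehension: pad each stride-2 slice with an underscore and trim to 2,
--     # so the odd trailing character needs no separate branch.
--     return [(s[i:i+2] + '_')[:2] for i in range(0, len(s), 2)]
-- ===== Notes on version B (the rewrite author's own statement) =====
-- stated objective: simpler
-- what changed: Replaces A's top-level even/odd case split, its two index-arithmetic loops (with the special i==0 branch and i=i*2 rebinding) and the separate trailing append by one uniform comprehension over range(0, len(s), 2) that pads each 2-slice with an underscore and trims to length 2.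
import Mathlib
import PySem

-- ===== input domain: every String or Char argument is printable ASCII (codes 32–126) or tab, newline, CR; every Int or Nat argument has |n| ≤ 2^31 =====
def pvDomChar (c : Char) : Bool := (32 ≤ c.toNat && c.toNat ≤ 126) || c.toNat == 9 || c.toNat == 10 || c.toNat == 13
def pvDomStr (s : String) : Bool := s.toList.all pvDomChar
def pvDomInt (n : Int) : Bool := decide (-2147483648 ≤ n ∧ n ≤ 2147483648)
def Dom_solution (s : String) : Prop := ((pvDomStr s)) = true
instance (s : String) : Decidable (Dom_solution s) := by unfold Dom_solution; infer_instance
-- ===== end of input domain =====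

-- B replaces A's even/odd case split and twin index loops by one uniform map over a
-- stride-2 range, padding each 2-slice with an underscore and trimming to length 2 (objective: simpler).


-- ===== PORT A =====
-- s[i]+''+s[i+1]: the pyGetD default 'a' is never read — every index A's loops reach is
-- provably in range, so Python A never raises and no Pre_ is needed.
-- int(len(s)/2) and int((len(s)-1)/2) are PySem.Int.truncdiv (exact here: len(s) < 2^53).
def solution (s : String) : List String :=
  if PySem.Int.mod (s.toList.length : Int) 2 = 0 then
    -- for i in range(int(len(s)/2)): …
    (PySem.List.pyRange 0 (PySem.Int.truncdiv (s.toList.length : Int) 2) 1).foldl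
      (fun acc i =>
        let add :=
          if i = 0 then
            String.ofList [PySem.List.pyGetD s.toList i 'a', PySem.List.pyGetD s.toList (i + 1) 'a']
          else
            let i := i * 2
            String.ofList [PySem.List.pyGetD s.toList i 'a', PySem.List.pyGetD s.toList (i + 1) 'a']
        acc ++ [add]) []
  else
    -- for i in range(int((len(s)-1)/2)): …  then append s[len(s)-1] + '_'
    ((PySem.List.pyRange 0 (PySem.Int.truncdiv ((s.toList.length : Int) - 1) 2) 1).foldl
      (fun acc i =>
        let add :=
          if i = 0 then
            String.ofList [PySem.List.pyGetD s.toList i 'a', PySem.List.pyGetD s.toList (i + 1) 'a']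
          else
            let i := i * 2
            String.ofList [PySem.List.pyGetD s.toList i 'a', PySem.List.pyGetD s.toList (i + 1) 'a']
        acc ++ [add]) [])
    ++ [String.ofList [PySem.List.pyGetD s.toList ((s.toList.length : Int) - 1) 'a', '_']]

-- ===== PORT B =====
-- [(s[i:i+2] + '_')[:2] for i in range(0, len(s), 2)]
def solution_alt (s : String) : List String :=
  (PySem.List.pyRange 0 (s.toList.length : Int) 2).map
    (fun i =>
      String.ofList (PySem.List.slice (PySem.List.slice s.toList (some i) (some (i + 2)) ++ ['_'])
        none (some 2)))

-- ===== PRECONDITION & SPEC =====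
def Spec_solution (s : String) (out : List String) : Prop := out = solution_alt s
instance (s : String) (out : List String) : Decidable (Spec_solution s out) := by unfold Spec_solution; infer_instance

-- ===== CLAIM (what is proved, stated in full; the proofs are below) =====
def Claim_equal_solution : Prop := ∀ (s : String), Dom_solution s → Spec_solution s (solution s)

-- ===== LEMMAS AND PROOFS =====

-- B's padded-and-trimmed slice at an index with a full pair below the end is that pair.
theorem pairB_full (cs : List Char) (i : Nat) (h : 2 * i + 1 < cs.length) (d : Char) :
    ((cs.drop (2 * i)).take 2 ++ ['_']).take 2 = [cs.getD (2 * i) d, cs.getD (2 * i + 1) d] := by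
  obtain ⟨a, b, t, hd⟩ : ∃ a b t, cs.drop (2 * i) = a :: b :: t := by
    have hl : 2 ≤ (cs.drop (2 * i)).length := by simp [List.length_drop]; omega
    match hx : cs.drop (2 * i) with
    | [] => rw [hx] at hl; simp at hl
    | [a] => rw [hx] at hl; simp at hl
    | a :: b :: t => exact ⟨a, b, t, rfl⟩
  have h0 := List.getElem?_drop (xs := cs) (i := 2 * i) (j := 0)
  have h1 := List.getElem?_drop (xs := cs) (i := 2 * i) (j := 1)
  rw [hd] at h0 h1
  simp at h0 h1
  simp [hd, List.getD, ← h0, ← h1]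

-- B's padded-and-trimmed slice at the last index of an odd-length list is that char plus '_'.
theorem pairB_last (cs : List Char) (i : Nat) (h : cs.length = 2 * i + 1) (d : Char) :
    ((cs.drop (2 * i)).take 2 ++ ['_']).take 2 = [cs.getD (2 * i) d, '_'] := by
  obtain ⟨a, hd⟩ : ∃ a, cs.drop (2 * i) = [a] := by
    have hl : (cs.drop (2 * i)).length = 1 := by simp [List.length_drop]; omega
    match hx : cs.drop (2 * i) with
    | [] => rw [hx] at hl; simp at hl
    | [a] => exact ⟨a, rfl⟩
    | a :: b :: t => rw [hx] at hl; simp at hl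
  have h0 := List.getElem?_drop (xs := cs) (i := 2 * i) (j := 0)
  rw [hd] at h0
  simp at h0
  simp [hd, List.getD, ← h0]

-- Closed form of B: a map over List.range of padded pairs.
theorem alt_closed (s : String) :
    solution_alt s =
      (List.range (((s.toList.length : Int) + 1) / 2).toNat).map
        (fun k => String.ofList (((s.toList.drop (2 * k)).take 2 ++ ['_']).take 2)) := by
  unfold solution_alt
  rw [PySem.List.pyRange_of_pos 0 (s.toList.length : Int) (by norm_num : (0:Int) < 2)]
  rcases Nat.eq_zero_or_pos s.toList.length with h0 | hpos
  · simp [h0]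
  · rw [if_pos (by exact_mod_cast hpos)]
    have hcount : (((s.toList.length : Int) - 0 + 2 - 1) / 2).toNat
        = (((s.toList.length : Int) + 1) / 2).toNat := by omega
    rw [hcount, List.map_map]
    refine List.map_congr_left (fun k _ => ?_)
    have hs : PySem.List.slice s.toList (some ((0:Int) + 2 * (k:Int))) (some ((0:Int) + 2 * (k:Int) + 2))
        = (s.toList.drop (2 * k)).take 2 := by
      have := PySem.List.slice_natCast_add (xs := s.toList) (j := 2 * k) (n := 2)
      push_cast at this ⊢
      simpa using this
    simp only [Function.comp, hs]
    rw [PySem.List.slice_to _ (by norm_num)]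
    rfl

-- Closed form of A's loop: a map over List.range of getD pairs.
theorem loopA_closed (cs : List Char) (K : Int) :
    (PySem.List.pyRange 0 K 1).foldl
      (fun acc i =>
        let add :=
          if i = 0 then
            String.ofList [PySem.List.pyGetD cs i 'a', PySem.List.pyGetD cs (i + 1) 'a']
          else
            let i := i * 2
            String.ofList [PySem.List.pyGetD cs i 'a', PySem.List.pyGetD cs (i + 1) 'a']
        acc ++ [add]) []
    = (List.range K.toNat).map
        (fun k => String.ofList [cs.getD (2 * k) 'a', cs.getD (2 * k + 1) 'a']) := by
  rw [PySem.List.pyRange_one, List.foldl_map, PySem.List.foldl_append_singleton_eq_map]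
  simp only [zero_add, sub_zero, List.nil_append]
  refine List.map_congr_left (fun k _ => ?_)
  by_cases hk : (k : Int) = 0
  · have : k = 0 := by exact_mod_cast hk
    subst this
    simp [pysem, List.getD]
  · rw [if_neg hk]
    have h2 : (k : Int) * 2 = ((2 * k : Nat) : Int) := by push_cast; ring
    have h3 : (k : Int) * 2 + 1 = ((2 * k + 1 : Nat) : Int) := by push_cast; ring
    rw [h3, h2, PySem.List.pyGetD_natCast, PySem.List.pyGetD_natCast]

-- ===== VERDICT (by name: the statement is the Claim_ definition above) =====
theorem solution_spec : Claim_equal_solution := by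
  intro s _
  unfold Spec_solution solution
  rw [alt_closed]
  rcases Nat.even_or_odd s.toList.length with ⟨m, hm⟩ | ⟨m, hm⟩
  · -- even length m + m
    rw [if_pos (by rw [PySem.Int.mod_eq_emod_of_pos (by norm_num)]; omega), loopA_closed]
    have hK : PySem.Int.truncdiv ((s.toList.length : Int)) 2 = (m : Int) := by
      rw [PySem.Int.truncdiv, Int.tdiv_eq_ediv]
      have h2 : ((s.toList.length : Int)) = ((m + m : Nat) : Int) := by rw [hm]
      rw [h2]; simp; omega
    have hc : (((s.toList.length : Int) + 1) / 2).toNat = m := by omega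
    rw [hK, hc]
    simp only [Int.toNat_natCast]
    refine List.map_congr_left (fun k hk => ?_)
    rw [pairB_full s.toList k (by simp at hk; omega) 'a']
  · -- odd length 2*m + 1
    rw [if_neg (by rw [PySem.Int.mod_eq_emod_of_pos (by norm_num)]; omega), loopA_closed]
    have hK : PySem.Int.truncdiv ((s.toList.length : Int) - 1) 2 = (m : Int) := by
      rw [PySem.Int.truncdiv, Int.tdiv_eq_ediv]
      have : ((s.toList.length : Int)) - 1 = ((2 * m : Nat) : Int) := by push_cast; omega
      rw [this]; simp
    have hc : (((s.toList.length : Int) + 1) / 2).toNat = m + 1 := by omega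
    rw [hK, hc]
    simp only [Int.toNat_natCast]
    rw [List.range_succ, List.map_append]
    congr 1
    · refine List.map_congr_left (fun k hk => ?_)
      rw [pairB_full s.toList k (by simp at hk; omega) 'a']
    · simp only [List.map_cons, List.map_nil]
      rw [pairB_last s.toList m hm 'a']
      have hcast : ((s.toList.length : Int)) - 1 = ((2 * m : Nat) : Int) := by push_cast; omega
      rw [hcast, PySem.List.pyGetD_natCast]
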